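-- pv_equiv track=rewrite | github.com/juliangrohmann/nv_isa_solver | nv_isa_solver/instruction_solver.py | analyse_modifiers
-- ===== SOURCE A (Python) =====
-- from typing import List
-- from collections import Counter, defaultdict
--
-- def analyse_modifiers(original: List[str], mutated: List[str]):
--     """
--     analyse a given list of modifiers and determine if the modifier bit can be a flag.
--     Can have false positives for flag detection but will be corrected by second stage.
--     """
--     original = Counter(original)
--     mutated = Counter(mutated)
--
--     difference = Counter(mutated)
--     difference.subtract(original)
--
--     flag_candidate = None
--     not_flag = False  # is it definetly not a flag.
--     effected = False  # is a modifier field effected.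
--     for name, count in difference.items():
--         if count == 0:
--             # Modifier is uneffected
--             continue
--         effected = True
--         if count <= 0:
--             not_flag = True
--             flag_candidate = None
--             continue
--
--         if count == 1 and not not_flag:
--             if flag_candidate is None:
--                 flag_candidate = name
--             else:
--                 flag_candidate = None
--                 not_flag = True
--
--     return (effected, flag_candidate)
-- ===== SOURCE B (Python) =====
-- from typing import List
--
-- def analyse_modifiers(original: List[str], mutated: List[str]):
--     """
--     Dictionary-free re-implementation: enumerate the distinct modifier names
--     (mutated first, then original) and compare occurrence counts directly.
--     """
--     names = list(dict.fromkeys(mutated + original))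
--     effected = any(mutated.count(n) != original.count(n) for n in names)
--     clean = all(original.count(n) <= mutated.count(n) for n in names)
--     ones = [n for n in names if mutated.count(n) == original.count(n) + 1]
--     flag_candidate = ones[0] if clean and len(ones) == 1 else None
--     return (effected, flag_candidate)
-- ===== Notes on version B (the rewrite author's own statement) =====
-- stated objective: alternative
-- what changed: Drops the Counter/difference dictionary and the stateful verdict loop entirely: B enumerates the distinct modifier names (dict.fromkeys of mutated+original) and compares occurrence counts directly with list.count, then decides the flag from the aggregates (any count changed, no count decreased, exactly one count grew by one); correct because A's loop verdict depends only on the multiset of per-name deltas, not on iteration order.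
import Mathlib
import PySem

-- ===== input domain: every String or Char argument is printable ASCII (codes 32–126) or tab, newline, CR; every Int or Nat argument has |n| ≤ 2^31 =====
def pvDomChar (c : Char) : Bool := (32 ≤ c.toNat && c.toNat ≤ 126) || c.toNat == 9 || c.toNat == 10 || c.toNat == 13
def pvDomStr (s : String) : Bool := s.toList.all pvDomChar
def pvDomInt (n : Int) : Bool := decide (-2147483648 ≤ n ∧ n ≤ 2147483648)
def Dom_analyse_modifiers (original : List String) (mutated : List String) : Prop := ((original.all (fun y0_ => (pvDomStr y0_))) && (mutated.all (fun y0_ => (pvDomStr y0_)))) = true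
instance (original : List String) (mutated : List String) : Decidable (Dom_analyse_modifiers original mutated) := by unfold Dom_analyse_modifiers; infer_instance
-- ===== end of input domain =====

-- B drops the Counter difference and the stateful loop: it enumerates the distinct names and compares occurrence counts directly, deciding the flag from aggregates (objective: alternative).

-- ===== PORT A =====
-- difference = Counter(mutated); difference.subtract(original)  (subtract of a Counter mapping: per key, self[k] -= count)
def pvDiffCounter (original : List String) (mutated : List String) : PySem.Dict String Int :=
  (PySem.Dict.counter original).items.foldl
    (fun d kv => d.insert kv.1 (d.getD kv.1 0 - kv.2)) (PySem.Dict.counter mutated)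

-- loop body of A; state = (flag_candidate, not_flag, effected)
def stepA (st : Option String × Bool × Bool) (kv : String × Int) : Option String × Bool × Bool :=
  if kv.2 == 0 then st
  else if kv.2 ≤ 0 then (none, true, true)
  else if kv.2 == 1 && !st.2.1 then
    (match st.1 with
     | none => (some kv.1, st.2.1, true)
     | some _ => (none, true, true))
  else (st.1, st.2.1, true)

def analyse_modifiers (original : List String) (mutated : List String) : Bool × Option String :=
  let difference := pvDiffCounter original mutated
  let st := difference.items.foldl stepA (none, false, false)
  (st.2.2, st.1)

-- ===== PORT B =====
def analyse_modifiers_alt (original : List String) (mutated : List String) : Bool × Option String :=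
  let names := PySem.List.dedup (mutated ++ original)
  let effected := names.any (fun n => mutated.count n != original.count n)
  let clean := names.all (fun n => decide (original.count n ≤ mutated.count n))
  let ones := names.filter (fun n => mutated.count n == original.count n + 1)
  -- ones[0] under the guard len(ones) == 1 is the head
  let flag_candidate := if clean && ones.length == 1 then ones.head? else none
  (effected, flag_candidate)

-- ===== PRECONDITION & SPEC =====
def Spec_analyse_modifiers (original : List String) (mutated : List String) (out : Bool × Option String) : Prop := out = analyse_modifiers_alt original mutated
instance (original : List String) (mutated : List String) (out : Bool × Option String) : Decidable (Spec_analyse_modifiers original mutated out) := by unfold Spec_analyse_modifiers; infer_instance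

-- ===== CLAIM (what is proved, stated in full; the proofs are below) =====
def Claim_equal_analyse_modifiers : Prop := ∀ (original : List String) (mutated : List String), Dom_analyse_modifiers original mutated → Spec_analyse_modifiers original mutated (analyse_modifiers original mutated)

-- ===== LEMMAS AND PROOFS =====

def pvHasNeg (l : List (String × Int)) : Bool := l.any (fun kv => decide (kv.2 < 0))
def pvOnes (l : List (String × Int)) : List String := (l.filter (fun kv => kv.2 == 1)).map (·.1)
def pvAnyNZ (l : List (String × Int)) : Bool := l.any (fun kv => kv.2 != 0)

theorem pvHasNeg_cons (k : String) (c : Int) (t : List (String × Int)) :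
    pvHasNeg ((k, c) :: t) = (decide (c < 0) || pvHasNeg t) := by simp [pvHasNeg]

theorem pvOnes_cons (k : String) (c : Int) (t : List (String × Int)) :
    pvOnes ((k, c) :: t) = if c == 1 then k :: pvOnes t else pvOnes t := by
  by_cases h : c = 1 <;> simp [pvOnes, h]

theorem pvAnyNZ_cons (k : String) (c : Int) (t : List (String × Int)) :
    pvAnyNZ ((k, c) :: t) = ((c != 0) || pvAnyNZ t) := by simp [pvAnyNZ]

-- once not_flag is true with no candidate, only effected can still change
theorem stepA_locked (l : List (String × Int)) (e : Bool) :
    l.foldl stepA (none, true, e) = (none, true, e || pvAnyNZ l) := by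
  induction l generalizing e with
  | nil => simp [pvAnyNZ]
  | cons kv t ih =>
    obtain ⟨k, c⟩ := kv
    by_cases h0 : c = 0
    · subst h0; simp [stepA, pvAnyNZ, ih]
    · by_cases hle : c ≤ 0 <;>
        simp [stepA, h0, hle, pvAnyNZ, ih, List.any_cons]

-- candidate in hand, everything clean: the candidate survives
theorem stepA_cand_clean (l : List (String × Int)) (x : String) (e : Bool)
    (hn : pvHasNeg l = false) (ho : pvOnes l = []) :
    l.foldl stepA (some x, false, e) = (some x, false, e || pvAnyNZ l) := by
  induction l generalizing e with
  | nil => simp [pvAnyNZ]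
  | cons kv t ih =>
    obtain ⟨k, c⟩ := kv
    rw [pvHasNeg_cons] at hn
    rw [pvOnes_cons] at ho
    have hc : ¬ c < 0 := by intro h; simp [h] at hn
    have h1 : ¬ c = 1 := by intro h; simp [h] at ho
    have hn' : pvHasNeg t = false := by cases h : pvHasNeg t <;> simp [h] at hn ⊢
    have ho' : pvOnes t = [] := by simpa [h1] using ho
    by_cases h0 : c = 0
    · subst h0; have IH := fun e => ih e hn' ho'
      simp [stepA, pvAnyNZ_cons, IH]
    · have hle : ¬ c ≤ 0 := by omega
      have IH := fun e => ih e hn' ho'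
      simp [stepA, h0, hle, h1, pvAnyNZ_cons, IH]

-- candidate in hand, a negative or a further 1 ahead: the candidate dies
theorem stepA_cand_dirty (l : List (String × Int)) (x : String) (e : Bool)
    (hd : pvHasNeg l = true ∨ pvOnes l ≠ []) :
    l.foldl stepA (some x, false, e) = (none, true, e || pvAnyNZ l) := by
  induction l generalizing e with
  | nil => simp [pvHasNeg, pvOnes] at hd
  | cons kv t ih =>
    obtain ⟨k, c⟩ := kv
    rw [pvHasNeg_cons] at hd
    rw [pvOnes_cons] at hd
    by_cases hneg : c < 0
    · have h0 : ¬ c = 0 := by omega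
      have hle : c ≤ 0 := by omega
      simp [stepA, h0, hle, pvAnyNZ_cons, stepA_locked]
    · by_cases h1 : c = 1
      · subst h1
        simp [stepA, pvAnyNZ_cons, stepA_locked]
      · have hd' : pvHasNeg t = true ∨ pvOnes t ≠ [] := by
          rcases hd with h | h
          · left; simpa [hneg] using h
          · right; simpa [h1] using h
        by_cases h0 : c = 0
        · subst h0
          have IH := fun e => ih e hd'
          simp [stepA, pvAnyNZ_cons, IH]
        · have hle : ¬ c ≤ 0 := by omega
          have IH := fun e => ih e hd'
          simp [stepA, h0, hle, h1, pvAnyNZ_cons, IH]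

-- clean state, nothing relevant ahead
theorem stepA_main_empty (l : List (String × Int)) (e : Bool)
    (hn : pvHasNeg l = false) (ho : pvOnes l = []) :
    l.foldl stepA (none, false, e) = (none, false, e || pvAnyNZ l) := by
  induction l generalizing e with
  | nil => simp [pvAnyNZ]
  | cons kv t ih =>
    obtain ⟨k, c⟩ := kv
    rw [pvHasNeg_cons] at hn
    rw [pvOnes_cons] at ho
    have hc : ¬ c < 0 := by intro h; simp [h] at hn
    have h1 : ¬ c = 1 := by intro h; simp [h] at ho
    have hn' : pvHasNeg t = false := by cases h : pvHasNeg t <;> simp [h] at hn ⊢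
    have ho' : pvOnes t = [] := by simpa [h1] using ho
    by_cases h0 : c = 0
    · subst h0; have IH := fun e => ih e hn' ho'
      simp [stepA, pvAnyNZ_cons, IH]
    · have hle : ¬ c ≤ 0 := by omega
      have IH := fun e => ih e hn' ho'
      simp [stepA, h0, hle, h1, pvAnyNZ_cons, IH]

-- clean state, exactly one +1 delta and no negative: it becomes the flag candidate
theorem stepA_main_one (l : List (String × Int)) (e : Bool) (y : String)
    (hn : pvHasNeg l = false) (ho : pvOnes l = [y]) :
    l.foldl stepA (none, false, e) = (some y, false, e || pvAnyNZ l) := by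
  induction l generalizing e with
  | nil => simp [pvOnes] at ho
  | cons kv t ih =>
    obtain ⟨k, c⟩ := kv
    rw [pvHasNeg_cons] at hn
    rw [pvOnes_cons] at ho
    have hc : ¬ c < 0 := by intro h; simp [h] at hn
    have hn' : pvHasNeg t = false := by cases h : pvHasNeg t <;> simp [h] at hn ⊢
    by_cases h1 : c = 1
    · subst h1
      simp at ho
      rcases ho with ⟨rfl, ho2⟩
      have HC := fun e => stepA_cand_clean t k e hn' ho2
      simp [stepA, pvAnyNZ_cons, HC]
    · have ho' : pvOnes t = [y] := by simpa [h1] using ho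
      by_cases h0 : c = 0
      · subst h0
        have IH := fun e => ih e hn' ho'
        simp [stepA, pvAnyNZ_cons, IH]
      · have hle : ¬ c ≤ 0 := by omega
        have IH := fun e => ih e hn' ho'
        simp [stepA, h0, hle, h1, pvAnyNZ_cons, IH]

-- clean state, two or more +1 deltas: not a flag
theorem stepA_main_many (l : List (String × Int)) (e : Bool)
    (hn : pvHasNeg l = false) (ho : 2 ≤ (pvOnes l).length) :
    l.foldl stepA (none, false, e) = (none, true, e || pvAnyNZ l) := by
  induction l generalizing e with
  | nil => simp [pvOnes] at ho
  | cons kv t ih =>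
    obtain ⟨k, c⟩ := kv
    rw [pvHasNeg_cons] at hn
    rw [pvOnes_cons] at ho
    have hc : ¬ c < 0 := by intro h; simp [h] at hn
    have hn' : pvHasNeg t = false := by cases h : pvHasNeg t <;> simp [h] at hn ⊢
    by_cases h1 : c = 1
    · subst h1
      simp at ho
      have hne : pvOnes t ≠ [] := by
        intro h; rw [h] at ho; simp at ho
      have HC := fun e => stepA_cand_dirty t k e (Or.inr hne)
      simp [stepA, pvAnyNZ_cons, HC]
    · have ho' : 2 ≤ (pvOnes t).length := by simpa [h1] using ho
      by_cases h0 : c = 0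
      · subst h0
        have IH := fun e => ih e hn' ho'
        simp [stepA, pvAnyNZ_cons, IH]
      · have hle : ¬ c ≤ 0 := by omega
        have IH := fun e => ih e hn' ho'
        simp [stepA, h0, hle, h1, pvAnyNZ_cons, IH]

-- any negative delta: not a flag
theorem stepA_main_neg (l : List (String × Int)) (e : Bool)
    (hn : pvHasNeg l = true) :
    l.foldl stepA (none, false, e) = (none, true, e || pvAnyNZ l) := by
  induction l generalizing e with
  | nil => simp [pvHasNeg] at hn
  | cons kv t ih =>
    obtain ⟨k, c⟩ := kv
    rw [pvHasNeg_cons] at hn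
    by_cases hneg : c < 0
    · have h0 : ¬ c = 0 := by omega
      have hle : c ≤ 0 := by omega
      simp [stepA, h0, hle, pvAnyNZ_cons, stepA_locked]
    · have hn' : pvHasNeg t = true := by simpa [hneg] using hn
      by_cases h1 : c = 1
      · subst h1
        have HC := fun e => stepA_cand_dirty t k e (Or.inl hn')
        simp [stepA, pvAnyNZ_cons, HC]
      · by_cases h0 : c = 0
        · subst h0
          have IH := fun e => ih e hn'
          simp [stepA, pvAnyNZ_cons, IH]
        · have hle : ¬ c ≤ 0 := by omega
          have IH := fun e => ih e hn'
          simp [stepA, h0, hle, h1, pvAnyNZ_cons, IH]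

-- ---- characterisation of the difference counter ----

-- a fold of `insert k (getD k 0 - v)` over pairs from distinct keys subtracts pointwise
theorem getD_foldl_diff_map (S : List String) (f : String → Int)
    (d : PySem.Dict String Int) (k : String) (hS : S.Nodup) :
    ((S.map (fun j => (j, f j))).foldl
        (fun d kv => d.insert kv.1 (d.getD kv.1 0 - kv.2)) d).getD k 0
      = d.getD k 0 - (if k ∈ S then f k else 0) := by
  induction S generalizing d with
  | nil => simp
  | cons a S ih =>
    rcases List.nodup_cons.mp hS with ⟨ha, hS'⟩
    by_cases hk : k = a
    · subst hk
      simp only [List.map_cons, List.foldl_cons, ih _ hS']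
      simp [PySem.Dict.getD_insert_self, ha]
    · simp only [List.map_cons, List.foldl_cons, ih _ hS']
      simp [PySem.Dict.getD_insert, hk]

theorem getD_diffCounter (original mutated : List String) (k : String) :
    (pvDiffCounter original mutated).getD k 0
      = (mutated.count k : Int) - (original.count k : Int) := by
  unfold pvDiffCounter
  rw [PySem.Dict.items_counter]
  rw [getD_foldl_diff_map _ _ _ _ (PySem.Set.nodup_ofList original)]
  rw [PySem.Dict.getD_counter]
  by_cases h : k ∈ original
  · simp [PySem.Set.mem_ofList, h]
  · simp [PySem.Set.mem_ofList, h, List.count_eq_zero_of_not_mem h]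

theorem keys_diffCounter (original mutated : List String) :
    (pvDiffCounter original mutated).keys
      = PySem.Set.update (PySem.Set.ofList mutated) (PySem.Set.ofList original) := by
  unfold pvDiffCounter
  rw [PySem.Dict.keys_foldl_insert_key]
  rw [PySem.Dict.keys_counter]
  congr 1
  rw [PySem.Dict.items_counter, List.map_map]
  rw [show ((fun p : String × Int => p.1) ∘ fun k => (k, (original.count k : Int))) = id from rfl, List.map_id]

theorem nodup_keys_diffCounter (original mutated : List String) :
    (pvDiffCounter original mutated).keys.Nodup := by
  unfold pvDiffCounter
  exact PySem.Dict.nodup_keys_foldl_insert_key _ _ _ _ (PySem.Dict.nodup_keys_counter _)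

theorem mem_keys_diffCounter (original mutated : List String) (x : String) :
    x ∈ (pvDiffCounter original mutated).keys ↔ x ∈ mutated ∨ x ∈ original := by
  rw [keys_diffCounter]
  simp [PySem.Set.mem_update, PySem.Set.mem_ofList]

theorem items_diffCounter (original mutated : List String) :
    (pvDiffCounter original mutated).items
      = (pvDiffCounter original mutated).keys.map
          (fun k => (k, (mutated.count k : Int) - (original.count k : Int))) := by
  rw [PySem.Dict.items_eq_map_keys _ (nodup_keys_diffCounter original mutated) 0]
  exact List.map_congr_left (fun k _ => by rw [getD_diffCounter])

-- ---- transfer of the aggregates from A's key list to B's name list ----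

theorem any_congr_mem {K N : List String} (p : String → Bool)
    (h : ∀ x, x ∈ K ↔ x ∈ N) : K.any p = N.any p := by
  cases hK : K.any p
  · cases hN : N.any p
    · rfl
    · rcases List.any_eq_true.mp hN with ⟨x, hx, hpx⟩
      exact absurd (List.any_eq_true.mpr ⟨x, (h x).mpr hx, hpx⟩) (by simp [hK])
  · rcases List.any_eq_true.mp hK with ⟨x, hx, hpx⟩
    exact (List.any_eq_true.mpr ⟨x, (h x).mp hx, hpx⟩).symm

theorem any_ext {α : Type} (l : List α) {p q : α → Bool} (h : ∀ x, p x = q x) :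
    l.any p = l.any q := by rw [funext h]

theorem pvOnes_map (K : List String) (g : String → Int) :
    pvOnes (K.map (fun k => (k, g k))) = K.filter (fun k => g k == 1) := by
  induction K with
  | nil => rfl
  | cons a K ih =>
    by_cases h : g a = 1 <;> simp [pvOnes_cons, h, ih]

-- ===== VERDICT (by name: the statement is the Claim_ definition above) =====
theorem analyse_modifiers_spec : Claim_equal_analyse_modifiers := by
  intro original mutated _
  unfold Spec_analyse_modifiers analyse_modifiers analyse_modifiers_alt
  dsimp only
  -- abbreviations
  set K := (pvDiffCounter original mutated).keys with hK
  set N := PySem.List.dedup (mutated ++ original) with hN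
  have hmem : ∀ x, x ∈ K ↔ x ∈ N := by
    intro x
    rw [hN]
    rw [PySem.List.mem_dedup, List.mem_append]
    exact mem_keys_diffCounter original mutated x
  have hKnd : K.Nodup := nodup_keys_diffCounter original mutated
  have hNnd : N.Nodup := by rw [hN]; exact PySem.List.nodup_dedup _
  have hperm : K.Perm N := (List.perm_ext_iff_of_nodup hKnd hNnd).mpr hmem
  have hitems : (pvDiffCounter original mutated).items
      = K.map (fun k => (k, (mutated.count k : Int) - (original.count k : Int))) :=
    items_diffCounter original mutated
  -- the three aggregates of A's loop, moved to B's name list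
  have hanz : pvAnyNZ (pvDiffCounter original mutated).items
      = N.any (fun n => mutated.count n != original.count n) := by
    rw [hitems]
    unfold pvAnyNZ
    rw [List.any_map]
    refine (any_ext K (fun n => ?_)).trans (any_congr_mem _ hmem)
    show (((mutated.count n : Int) - original.count n) != 0) = _
    rw [Bool.eq_iff_iff]
    simp only [bne_iff_ne, ne_eq]
    omega
  have hneg : pvHasNeg (pvDiffCounter original mutated).items
      = N.any (fun n => decide (mutated.count n < original.count n)) := by
    rw [hitems]
    unfold pvHasNeg
    rw [List.any_map]
    refine (any_ext K (fun n => ?_)).trans (any_congr_mem _ hmem)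
    show (decide ((mutated.count n : Int) - original.count n < 0)) = _
    rw [Bool.eq_iff_iff]
    simp only [decide_eq_true_eq]
    omega
  have hones : (pvOnes (pvDiffCounter original mutated).items).Perm
      (N.filter (fun n => mutated.count n == original.count n + 1)) := by
    rw [hitems, pvOnes_map]
    have : K.filter (fun k => ((mutated.count k : Int) - (original.count k : Int)) == 1)
        = K.filter (fun n => mutated.count n == original.count n + 1) := by
      refine List.filter_congr (fun n _ => ?_)
      rw [Bool.eq_iff_iff]
      simp only [beq_iff_eq]
      omega
    rw [this]
    exact hperm.filter _
  -- clean = !hasNeg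
  have hclean : N.all (fun n => decide (original.count n ≤ mutated.count n))
      = !(pvHasNeg (pvDiffCounter original mutated).items) := by
    rw [hneg, List.all_eq_not_any_not]
    congr 1
    refine any_ext N (fun n => ?_)
    rw [Bool.eq_iff_iff]
    simp only [Bool.not_eq_true', decide_eq_false_iff_not, not_le, decide_eq_true_eq]
  -- case analysis on A's verdict
  rcases hn : pvHasNeg (pvDiffCounter original mutated).items with _ | _
  · have hcl : N.all (fun n => decide (original.count n ≤ mutated.count n)) = true := by
      rw [hclean, hn]; rfl
    rcases ho : pvOnes (pvDiffCounter original mutated).items with _ | ⟨y, r⟩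
    · rw [stepA_main_empty _ false hn ho]
      have h0 : (N.filter (fun n => mutated.count n == original.count n + 1)).length = 0 := by
        rw [← hones.length_eq, ho]; rfl
      simp [hanz, hcl, h0]
    · rcases r with _ | ⟨z, r'⟩
      · rw [stepA_main_one _ false y hn ho]
        have h1 : N.filter (fun n => mutated.count n == original.count n + 1) = [y] := by
          have hp := hones.symm
          rw [ho] at hp
          exact List.perm_singleton.mp hp
        simp [hanz, hcl, h1]
      · rw [stepA_main_many _ false hn (by rw [ho]; simp)]
        have h2 : ((N.filter (fun n => mutated.count n == original.count n + 1)).length == 1) = false := by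
          have := hones.length_eq
          rw [ho] at this
          simp at this ⊢
          omega
        simp [hanz, h2]
  · rw [stepA_main_neg _ false hn]
    have hcl : (N.all (fun n => decide (original.count n ≤ mutated.count n))) = false := by
      rw [hclean, hn]; rfl
    simp [hanz, hcl]
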